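-- pv_equiv track=rewrite | github.com/opencui/opendu | datasets/sgd/generate_slot.py | judge_legal_loc
-- ===== SOURCE A (Python) =====
-- def judge_legal_loc(utterance,pattern):
--     '''
--     to judge if the pattern have a legal loc in the utterance
--     '''
--     starts=set()
--     for i in range(len(utterance)):
--         if utterance.find(pattern,i) != -1:
--             starts.add(utterance.find(pattern,i))
--     starts=list(starts)
--
--     ends = [start + len(pattern) - 1 for start in starts]
--     span = [(start, end) for start, end in zip(starts, ends)]
--     for idx, (start, end) in enumerate(span):
--
--         if (start == 0 or utterance[start - 1] == ' ' or  utterance[start - 1] in '!"#$%&\'()*+,-./;<=>?@[\\]^_`{|}~') and (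
--                 end == len(utterance) - 1 or utterance[end + 1] == ' ' or utterance[end + 1] in '!"#$%&\'()*+,-./;<=>?@[\\]^_`{|}~'):
--
--                 return True
--
--     return False
-- ===== SOURCE B (Python) =====
-- def judge_legal_loc(utterance, pattern):
--     '''
--     to judge if the pattern have a legal loc in the utterance
--     '''
--     boundary = ' !"#$%&\'()*+,-./;<=>?@[\\]^_`{|}~'
--     n, m = len(utterance), len(pattern)
--     return any(
--         utterance[i:i + m] == pattern
--         and (i == 0 or utterance[i - 1] in boundary)
--         and (i + m == n or utterance[i + m] in boundary)
--         for i in range(n - m + 1))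
-- ===== Notes on version B (the rewrite author's own statement) =====
-- stated objective: faster
-- what changed: A calls utterance.find(pattern, i) twice for every index i to build a set of match positions, then materialises ends/span lists and scans them; B does a single sliding-window pass over the candidate start positions, testing the window and its two boundary characters directly with early exit via any().
-- outside the precondition, e.g. on judge_legal_loc('a ', ''): A returns False, B returns True
import Mathlib
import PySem

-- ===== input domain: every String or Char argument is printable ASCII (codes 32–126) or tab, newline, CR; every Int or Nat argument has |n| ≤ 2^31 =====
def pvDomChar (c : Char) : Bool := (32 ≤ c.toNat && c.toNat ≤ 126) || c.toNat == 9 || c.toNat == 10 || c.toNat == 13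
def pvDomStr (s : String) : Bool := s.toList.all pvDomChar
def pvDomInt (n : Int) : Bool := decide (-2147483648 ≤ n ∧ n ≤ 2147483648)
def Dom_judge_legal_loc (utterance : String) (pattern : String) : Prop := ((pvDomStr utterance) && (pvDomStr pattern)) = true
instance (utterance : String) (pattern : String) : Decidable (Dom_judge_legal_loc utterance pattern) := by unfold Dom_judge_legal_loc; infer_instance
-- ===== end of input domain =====

-- B replaces A's n repeated str.find scans plus set/zip bookkeeping by one sliding-window
-- pass over all candidate start positions (objective: faster, asymptotic).

-- ===== PORT A =====
-- Python's punctuation string literal '!"#$%&\'()*+,-./;<=>?@[\\]^_`{|}~' as a char list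
def pvPunctA : List Char := "!\"#$%&'()*+,-./;<=>?@[\\]^_`{|}~".toList
-- 'utterance[i] == " " or utterance[i] in <punct>': the indexed value is one char, so the
-- Python 'in' on the 1-char string is exactly char membership; index always in range where
-- A evaluates it (the 'none' branch is unreachable there).
def pvBoundA (u : List Char) (i : Int) : Bool :=
  match PySem.List.pyGet? u i with
  | some c => c == ' ' || pvPunctA.contains c
  | none => false

def judge_legal_loc (utterance : String) (pattern : String) : Bool :=
  let u := utterance.toList
  let n : Int := u.length
  let starts : PySem.Set Int :=
    (PySem.List.pyRange 0 n 1).foldl (fun st i =>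
      if PySem.Str.findFrom utterance pattern i none ≠ -1 then
        PySem.Set.add st (PySem.Str.findFrom utterance pattern i none)
      else st) PySem.Set.empty
  let ends : List Int := starts.map (fun start => start + (pattern.toList.length : Int) - 1)
  let span : List (Int × Int) := starts.zip ends
  -- 'for …: if cond: return True / return False' = any (result is order-independent, so
  -- consuming the set's elements through any is exact)
  span.any (fun se =>
    (se.1 == 0 || pvBoundA u (se.1 - 1)) && (se.2 == n - 1 || pvBoundA u (se.2 + 1)))

-- ===== PORT B =====
-- the boundary string ' !"#$%&\'()*+,-./;<=>?@[\\]^_`{|}~' of Source B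
def pvBoundaryB : List Char := " !\"#$%&'()*+,-./;<=>?@[\\]^_`{|}~".toList
-- 'utterance[i] in boundary' (1-char membership; index in range where evaluated)
def pvBoundB (u : List Char) (i : Int) : Bool :=
  match PySem.List.pyGet? u i with
  | some c => pvBoundaryB.contains c
  | none => false

def judge_legal_loc_alt (utterance : String) (pattern : String) : Bool :=
  let u := utterance.toList
  let n : Int := u.length
  let m : Int := pattern.toList.length
  (PySem.List.pyRange 0 (n - m + 1) 1).any (fun i =>
    (PySem.List.slice u (some i) (some (i + m)) == pattern.toList)
    && (i == 0 || pvBoundB u (i - 1))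
    && (i + m == n || pvBoundB u (i + m)))

-- ===== PRECONDITION & SPEC =====
-- Pre_ excludes the empty pattern, a degenerate corner: there A's candidate set (every index
-- except len(utterance), an artefact of its scanning loop) and B's (every index) both match
-- "nothing" everywhere, and the two equally arbitrary verdicts can differ.
def Pre_judge_legal_loc (utterance : String) (pattern : String) : Prop := pattern ≠ ""
instance (utterance : String) (pattern : String) : Decidable (Pre_judge_legal_loc utterance pattern) := by unfold Pre_judge_legal_loc; infer_instance
def pvWitness_judge_legal_loc : String × String := ("a cat!", "cat")

def Spec_judge_legal_loc (utterance : String) (pattern : String) (out : Bool) : Prop := out = judge_legal_loc_alt utterance pattern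
instance (utterance : String) (pattern : String) (out : Bool) : Decidable (Spec_judge_legal_loc utterance pattern out) := by unfold Spec_judge_legal_loc; infer_instance

-- ===== CLAIM (what is proved, stated in full; the proofs are below) =====
def Claim_equal_judge_legal_loc : Prop := ∀ (utterance : String) (pattern : String), Dom_judge_legal_loc utterance pattern → Pre_judge_legal_loc utterance pattern → Spec_judge_legal_loc utterance pattern (judge_legal_loc utterance pattern)

-- ===== LEMMAS AND PROOFS =====


-- the shared "legal occurrence" predicate both programs decide
def pvE (utterance pattern : String) : Prop :=
  ∃ s : Int, 0 ≤ s ∧ pattern.toList <+: utterance.toList.drop s.toNat ∧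
    (s = 0 ∨ pvBoundB utterance.toList (s - 1) = true) ∧
    (s + (pattern.toList.length : Int) = (utterance.toList.length : Int) ∨
      pvBoundB utterance.toList (s + (pattern.toList.length : Int)) = true)

theorem pvBoundary_cons : pvBoundaryB = ' ' :: pvPunctA := by decide

theorem pvBound_eq (u : List Char) (i : Int) : pvBoundA u i = pvBoundB u i := by
  unfold pvBoundA pvBoundB
  cases h : PySem.List.pyGet? u i with
  | none => rfl
  | some c => rw [pvBoundary_cons]; simp only [List.contains_cons]

theorem pvMem_foldl_add (l : List Int) (P : Int → Prop) [DecidablePred P] (f : Int → Int)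
    (st : PySem.Set Int) (x : Int) :
    x ∈ l.foldl (fun st i => if P i then PySem.Set.add st (f i) else st) st ↔
      x ∈ st ∨ ∃ i ∈ l, P i ∧ f i = x := by
  induction l generalizing st with
  | nil => simp
  | cons hd tl ih =>
    simp only [List.foldl_cons, ih, List.mem_cons]
    by_cases hc : P hd
    · simp only [hc, if_true, PySem.Set.mem_add]
      constructor
      · intro h
        rcases h with (h | h) | ⟨i, hi, hci, hfi⟩
        · exact Or.inl h
        · exact Or.inr ⟨hd, Or.inl rfl, hc, h.symm⟩
        · exact Or.inr ⟨i, Or.inr hi, hci, hfi⟩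
      · intro h
        rcases h with h | ⟨i, hi | hi, hci, hfi⟩
        · exact Or.inl (Or.inl h)
        · exact Or.inl (Or.inr (by rw [hi] at hfi; exact hfi.symm))
        · exact Or.inr ⟨i, hi, hci, hfi⟩
    · simp only [hc, if_false]
      constructor
      · intro h
        rcases h with h | ⟨i, hi, hci, hfi⟩
        · exact Or.inl h
        · exact Or.inr ⟨i, Or.inr hi, hci, hfi⟩
      · intro h
        rcases h with h | ⟨i, hi | hi, hci, hfi⟩
        · exact Or.inl h
        · exact absurd (by rw [hi] at hci; exact hci) hc
        · exact Or.inr ⟨i, hi, hci, hfi⟩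

theorem pvZipMap (l : List Int) (f : Int → Int) :
    l.zip (l.map f) = l.map (fun s => (s, f s)) := by
  induction l with
  | nil => rfl
  | cons hd tl ih => simp [ih]

theorem pvToList_ne_nil (pattern : String) (hp : pattern ≠ "") : pattern.toList ≠ [] := by
  intro h
  apply hp
  cases pattern
  simp_all

theorem pvOcc_iff (utterance pattern : String) (hp : pattern ≠ "") (x : Int) :
    (∃ i ∈ PySem.List.pyRange 0 (utterance.toList.length : Int) 1,
        PySem.Str.findFrom utterance pattern i none ≠ -1 ∧
        PySem.Str.findFrom utterance pattern i none = x) ↔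
      (0 ≤ x ∧ pattern.toList <+: utterance.toList.drop x.toNat) := by
  have hp' : pattern.toList ≠ [] := pvToList_ne_nil pattern hp
  constructor
  · rintro ⟨i, hi, hne, heq⟩
    rw [PySem.List.mem_pyRange_one] at hi
    have hi' : ((i.toNat : Nat) : Int) = i := Int.toNat_of_nonneg hi.1
    have hk : i.toNat ≤ utterance.toList.length := by omega
    rw [PySem.Str.findFrom_eq, ← hi'] at hne heq
    obtain ⟨hle, hpre, _⟩ :=
      PySem.Chars.findFrom_natCast_spec utterance.toList pattern.toList i.toNat hk hne
    rw [heq] at hle hpre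
    exact ⟨le_trans (by positivity) hle, hpre⟩
  · rintro ⟨hx0, hpre⟩
    have hlen : pattern.toList.length ≤ utterance.toList.length - x.toNat := by
      have h1 := hpre.length_le
      simp only [List.length_drop] at h1
      omega
    have hplen : 0 < pattern.toList.length := List.length_pos_of_ne_nil hp'
    have hxn : x.toNat < utterance.toList.length := by omega
    have hx' : ((x.toNat : Nat) : Int) = x := Int.toNat_of_nonneg hx0
    have hne : PySem.Chars.findFrom utterance.toList pattern.toList (x.toNat : Int) none ≠ -1 :=
      fun h =>
        ((PySem.Chars.findFrom_natCast_eq_neg_one_iff utterance.toList pattern.toList x.toNat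
          (le_of_lt hxn)).mp h) hpre.isInfix
    obtain ⟨hle, _, hmin⟩ :=
      PySem.Chars.findFrom_natCast_spec utterance.toList pattern.toList x.toNat
        (le_of_lt hxn) hne
    have heq : PySem.Chars.findFrom utterance.toList pattern.toList (x.toNat : Int) none = x := by
      set ff := PySem.Chars.findFrom utterance.toList pattern.toList (x.toNat : Int) none with hff
      by_contra hneq
      have hlt : x.toNat < ff.toNat := by omega
      exact hmin x.toNat (le_refl _) hlt hpre
    refine ⟨x, ?_, ?_, ?_⟩
    · rw [PySem.List.mem_pyRange_one]
      constructor
      · exact hx0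
      · omega
    · rw [PySem.Str.findFrom_eq, ← hx', heq]
      omega
    · rw [PySem.Str.findFrom_eq, ← hx', heq]
      exact hx'.symm

theorem pvA_iff (utterance pattern : String) (hp : pattern ≠ "") :
    judge_legal_loc utterance pattern = true ↔ pvE utterance pattern := by
  unfold judge_legal_loc pvE
  simp only [pvZipMap, List.any_map, List.any_eq_true, Function.comp]
  constructor
  · rintro ⟨s, hs, hpred⟩
    rw [pvMem_foldl_add] at hs
    rcases hs with h | h
    · simp [PySem.Set.empty] at h
    · obtain ⟨hs0, hpre⟩ := (pvOcc_iff utterance pattern hp s).mp h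
      simp only [Bool.and_eq_true, Bool.or_eq_true, beq_iff_eq] at hpred
      obtain ⟨h1, h2⟩ := hpred
      refine ⟨s, hs0, hpre, ?_, ?_⟩
      · rcases h1 with h1 | h1
        · exact Or.inl h1
        · exact Or.inr (by rw [← pvBound_eq]; exact h1)
      · rcases h2 with h2 | h2
        · exact Or.inl (by omega)
        · refine Or.inr ?_
          rw [show s + (pattern.toList.length : Int) - 1 + 1
              = s + (pattern.toList.length : Int) by ring] at h2
          rw [← pvBound_eq]
          exact h2
  · rintro ⟨s, hs0, hpre, h1, h2⟩
    refine ⟨s, ?_, ?_⟩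
    · rw [pvMem_foldl_add]
      exact Or.inr ((pvOcc_iff utterance pattern hp s).mpr ⟨hs0, hpre⟩)
    · simp only [Bool.and_eq_true, Bool.or_eq_true, beq_iff_eq]
      constructor
      · rcases h1 with h1 | h1
        · exact Or.inl h1
        · exact Or.inr (by rw [pvBound_eq]; exact h1)
      · rcases h2 with h2 | h2
        · exact Or.inl (by omega)
        · refine Or.inr ?_
          rw [show s + (pattern.toList.length : Int) - 1 + 1
              = s + (pattern.toList.length : Int) by ring, pvBound_eq]
          exact h2

theorem pvB_iff (utterance pattern : String) (hp : pattern ≠ "") :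
    judge_legal_loc_alt utterance pattern = true ↔ pvE utterance pattern := by
  have hp' : pattern.toList ≠ [] := pvToList_ne_nil pattern hp
  have hplen : 0 < pattern.toList.length := List.length_pos_of_ne_nil hp'
  unfold judge_legal_loc_alt pvE
  simp only [List.any_eq_true, PySem.List.mem_pyRange_one, Bool.and_eq_true, Bool.or_eq_true,
    beq_iff_eq]
  constructor
  · rintro ⟨i, ⟨hi0, hin⟩, ⟨hsl, h1⟩, h2⟩
    have hsl' : pattern.toList <+: utterance.toList.drop i.toNat := by
      rw [PySem.List.slice_toNat _ hi0 (by omega)] at hsl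
      have hlen : (i + (pattern.toList.length : Int)).toNat - i.toNat
          = pattern.toList.length := by omega
      rw [hlen] at hsl
      exact List.prefix_iff_eq_take.mpr hsl.symm
    exact ⟨i, hi0, hsl', h1, h2⟩
  · rintro ⟨s, hs0, hpre, h1, h2⟩
    have hlen : pattern.toList.length ≤ utterance.toList.length - s.toNat := by
      have h1' := hpre.length_le
      simp only [List.length_drop] at h1'
      omega
    refine ⟨s, ⟨hs0, by omega⟩, ⟨?_, h1⟩, h2⟩
    rw [PySem.List.slice_toNat _ hs0 (by omega)]
    have hlen2 : (s + (pattern.toList.length : Int)).toNat - s.toNat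
        = pattern.toList.length := by omega
    rw [hlen2]
    exact (List.prefix_iff_eq_take.mp hpre).symm

-- ===== VERDICT (by name: the statement is the Claim_ definition above) =====
theorem judge_legal_loc_spec : Claim_equal_judge_legal_loc := by
  intro utterance pattern _ hpre
  unfold Spec_judge_legal_loc
  have hA := pvA_iff utterance pattern hpre
  have hB := pvB_iff utterance pattern hpre
  exact Bool.coe_iff_coe.mp (hA.trans hB.symm)
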